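-- pv_equiv track=rewrite | github.com/rmaniego/didak | didak/didak.py | indent_correction
-- ===== SOURCE A (Python) =====
-- def get_indents(line, add=0):
--     spaces = []
--     for character in line:
--         if line[0] != " ":
--             break
--         if (len(spaces) > 1 and character != " "):
--             break
--         else:
--             spaces.append(" ")
--     indents = ["".join(spaces)]
--     for x in range(add):
--         indents.append("    ")
--     return "".join(indents)
--
-- def indent_correction(line):
--     line = line.replace("\t", "    ")
--     indents = get_indents(line)
--     spaces = len(indents) % 4
--     while (len(indents) % 4) != 0:
--         if spaces < 2:
--             indents = indents[:-1]
--         else: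
--             indents += " "
--     return f"{indents}{line.strip()}"
-- ===== SOURCE B (Python) =====
-- def indent_correction(line):
--     line = line.replace("\t", "    ")
--     indent = len(line) - len(line.lstrip(" "))
--     return " " * ((indent + 2) // 4 * 4) + line.strip()
-- ===== Notes on version B (the rewrite author's own statement) =====
-- stated objective: simpler
-- what changed: Replaces A's per-character accumulation loop (get_indents) and the iterative while-loop that removes/adds one space at a time with a closed-form leading-space count (len - len(lstrip)) and closed-form rounding ((indent+2)//4*4).
-- intended difference: On lines whose first character (after tab expansion) is a single space followed by a non-space, A's helper unconditionally counts the first two characters as indentation and so rounds the indent up to four spaces, while B counts the actual single leading space and rounds it down to zero, which is the intended normalization. — e.g. on indent_correction(" x"): A returns " x", B returns "x"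
import Mathlib
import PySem

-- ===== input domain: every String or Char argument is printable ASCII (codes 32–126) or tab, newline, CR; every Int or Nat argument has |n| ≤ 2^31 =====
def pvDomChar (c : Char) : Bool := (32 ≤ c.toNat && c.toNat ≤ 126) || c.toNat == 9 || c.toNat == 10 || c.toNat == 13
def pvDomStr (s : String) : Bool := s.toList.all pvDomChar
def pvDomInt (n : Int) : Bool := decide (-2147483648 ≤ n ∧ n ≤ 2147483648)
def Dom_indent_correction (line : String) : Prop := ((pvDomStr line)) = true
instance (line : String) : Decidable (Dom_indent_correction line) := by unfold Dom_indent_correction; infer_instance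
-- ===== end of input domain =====

-- B replaces A's per-character scan and iterative ±1 rounding loop by a closed-form
-- leading-space count and closed-form rounding ((n+2)/4*4); objective: simpler.
-- A and B differ on the D_ inputs below (A miscounts a 1-space indent followed by a non-space).

-- ===== PORT A =====
-- for character in line: if line[0] != " ": break; if len(spaces) > 1 and character != " ": break; else spaces.append(" ")
def giLoop (first : Option Char) (cs : List Char) (spaces : List Char) : List Char :=
  match cs with
  | [] => spaces
  | c :: rest =>
    if first ≠ some ' ' then spaces
    else if spaces.length > 1 && c != ' ' then spaces
    else giLoop first rest (spaces ++ [' '])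

-- get_indents(line, add=0); strings handled as List Char throughout (PySem.Chars)
def get_indents (line : List Char) (add : Int) : List Char :=
  let spaces := giLoop line.head? line []
  let indents := (PySem.List.pyRange 0 add 1).foldl (fun acc _ => acc ++ [[' ', ' ', ' ', ' ']]) [spaces]
  indents.flatten

-- while (len(indents) % 4) != 0: if spaces < 2: indents = indents[:-1] else: indents += " "
-- fuel is a totality guard only: from the call site's state the loop ends within 3 iterations (see icWhile_replicate)
def icWhile (fuel : Nat) (indents : List Char) (spaces : Nat) : List Char :=
  match fuel with
  | 0 => indents
  | fuel + 1 =>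
    if indents.length % 4 ≠ 0 then
      if spaces < 2 then icWhile fuel indents.dropLast spaces
      else icWhile fuel (indents ++ [' ']) spaces
    else indents

def indent_correction (line : String) : String :=
  let l := PySem.Chars.replace line.toList ['\t'] [' ', ' ', ' ', ' ']
  let indents := get_indents l 0
  let indents := icWhile 4 indents (indents.length % 4)
  String.ofList (indents ++ PySem.Chars.strip l)

-- ===== PORT B =====
def indent_correction_alt (line : String) : String :=
  let l := PySem.Chars.replace line.toList ['\t'] [' ', ' ', ' ', ' ']
  -- len(line) - len(line.lstrip(" ")) : lstrip(" ") drops leading ' ' only, ported by hand (exact)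
  let indent := l.length - (l.dropWhile (fun c => c == ' ')).length
  -- (indent + 2) // 4 * 4 : both operands nonnegative, so Python's // is Nat division
  String.ofList (List.replicate ((indent + 2) / 4 * 4) ' ' ++ PySem.Chars.strip l)

-- ===== PRECONDITION & SPEC =====
def dCheck (cs : List Char) : Bool :=
  cs[0]? == some ' ' && ((cs[1]?).elim false (fun c => c != ' ' && c != '\t'))

-- On lines whose first character (after tab expansion) is one space followed by a non-space,
-- A's helper counts the first TWO characters as indentation and rounds up to 4 spaces, while
-- B counts the actual single leading space and rounds down to 0, the intended normalization.
def D_indent_correction (line : String) : Prop := dCheck line.toList = true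
instance (line : String) : Decidable (D_indent_correction line) := by unfold D_indent_correction; infer_instance

def Spec_indent_correction (line : String) (out : String) : Prop := ¬ D_indent_correction line → out = indent_correction_alt line
instance (line : String) (out : String) : Decidable (Spec_indent_correction line out) := by unfold Spec_indent_correction; infer_instance

def pvDiffWitness_indent_correction : String := " x"
def pvDiffWitnessOut_indent_correction : String × String := ("    x", "x")

-- ===== CLAIM =====
def Claim_unchanged_indent_correction : Prop := ∀ (line : String), Dom_indent_correction line → Spec_indent_correction line (indent_correction line)
def Claim_changed_indent_correction : Prop := Dom_indent_correction (pvDiffWitness_indent_correction) ∧ D_indent_correction (pvDiffWitness_indent_correction) ∧ indent_correction (pvDiffWitness_indent_correction) = pvDiffWitnessOut_indent_correction.1 ∧ indent_correction_alt (pvDiffWitness_indent_correction) = pvDiffWitnessOut_indent_correction.2 ∧ pvDiffWitnessOut_indent_correction.1 ≠ pvDiffWitnessOut_indent_correction.2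
def Claim_exact_indent_correction : Prop := ∀ (line : String), Dom_indent_correction line → D_indent_correction line → indent_correction line ≠ indent_correction_alt line

-- ===== LEMMAS AND PROOFS =====

-- leading-space count and A's helper's count (proof bookkeeping only)
def leadCount (l : List Char) : Nat := (l.takeWhile (fun c => c == ' ')).length
def nAval (l : List Char) : Nat :=
  if PySem.Chars.startswith l [' '] then
    min l.length (2 + leadCount (PySem.List.slice l (some 2) none))
  else 0

-- single-char replace is a flatMap (no named PySem lemma exposes replace's recursion)
theorem replace_go_tab (r : List Char) (fuel : Nat) (l acc : List Char) (h : l.length ≤ fuel) :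
    PySem.Chars.replace.go ['\t'] r fuel l acc =
      acc.reverse ++ l.flatMap (fun c => if c = '\t' then r else [c]) := by
  induction fuel generalizing l acc with
  | zero =>
    have : l = [] := by cases l <;> simp_all
    subst this; simp [PySem.Chars.replace.go]
  | succ fuel ih =>
    cases l with
    | nil => simp [PySem.Chars.replace.go]
    | cons c t =>
      rw [PySem.Chars.replace.go]
      have hp : (['\t'].isPrefixOf (c :: t)) = (c == '\t') := by
        simp [List.isPrefixOf, eq_comm]
      rw [hp]
      have ht : t.length ≤ fuel := by simp at h; omega
      by_cases hc : c = '\t'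
      · subst hc
        simp only [beq_self_eq_true, if_true]
        rw [show List.drop (['\t'].length) ('\t' :: t) = t from rfl, ih _ _ ht]
        simp
      · have : (c == '\t') = false := by simp [hc]
        rw [this]
        simp only [Bool.false_eq_true, if_false]
        rw [ih _ _ ht]
        simp [hc]

theorem replace_tab (l r : List Char) :
    PySem.Chars.replace l ['\t'] r = l.flatMap (fun c => if c = '\t' then r else [c]) := by
  rw [PySem.Chars.replace]
  simp only [List.isEmpty_cons, Bool.false_eq_true, if_false]
  simpa using replace_go_tab r l.length l [] le_rfl

theorem giLoop_ge2 (cs : List Char) (sp : List Char) (h : 1 < sp.length) :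
    giLoop (some ' ') cs sp = sp ++ List.replicate (cs.takeWhile (fun c => c == ' ')).length ' ' := by
  induction cs generalizing sp with
  | nil => simp [giLoop]
  | cons c rest ih =>
    by_cases hc : c = ' '
    · subst hc
      rw [giLoop]
      simp only [ne_eq, not_true_eq_false, if_false, bne_self_eq_false, Bool.and_false,
        Bool.false_eq_true, if_false]
      rw [ih _ (by simp; omega)]
      simp [List.replicate_succ, List.append_assoc]
    · rw [giLoop]
      have : (c != ' ') = true := by simp [hc]
      simp [hc, this, h]

theorem icWhile_stop (f : Nat) (l : List Char) (s : Nat) (h : l.length % 4 = 0) :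
    icWhile (f + 1) l s = l := by
  rw [icWhile]; simp [h]

theorem icWhile_drop (f : Nat) (l : List Char) (s : Nat) (h : l.length % 4 ≠ 0) (hs : s < 2) :
    icWhile (f + 1) l s = icWhile f l.dropLast s := by
  rw [icWhile]; simp [h, hs]

theorem icWhile_app (f : Nat) (l : List Char) (s : Nat) (h : l.length % 4 ≠ 0) (hs : ¬ s < 2) :
    icWhile (f + 1) l s = icWhile f (l ++ [' ']) s := by
  rw [icWhile]; simp [h, hs]

theorem icWhile_replicate (n : Nat) :
    icWhile 4 (List.replicate n ' ') (n % 4) = List.replicate ((n + 2) / 4 * 4) ' ' := by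
  have h4 : n % 4 = 0 ∨ n % 4 = 1 ∨ n % 4 = 2 ∨ n % 4 = 3 := by omega
  rcases h4 with h | h | h | h
  · rw [show (4 : Nat) = 3 + 1 from rfl, icWhile_stop _ _ _ (by simp [h])]
    congr 1; omega
  · rw [show (4 : Nat) = 3 + 1 from rfl, icWhile_drop _ _ _ (by simp [h]) (by omega)]
    rw [List.dropLast_replicate]
    rw [show (3 : Nat) = 2 + 1 from rfl, icWhile_stop _ _ _ (by simp; omega)]
    congr 1; omega
  · rw [show (4 : Nat) = 3 + 1 from rfl, icWhile_app _ _ _ (by simp [h]) (by omega),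
      ← List.replicate_succ']
    rw [show (3 : Nat) = 2 + 1 from rfl, icWhile_app _ _ _ (by simp; omega) (by omega),
      ← List.replicate_succ']
    rw [show (2 : Nat) = 1 + 1 from rfl, icWhile_stop _ _ _ (by simp; omega)]
    congr 1; omega
  · rw [show (4 : Nat) = 3 + 1 from rfl, icWhile_app _ _ _ (by simp [h]) (by omega),
      ← List.replicate_succ']
    rw [show (3 : Nat) = 2 + 1 from rfl, icWhile_stop _ _ _ (by simp; omega)]
    congr 1; omega

-- the result of A's helper (with add = 0) is a block of nAval l spaces
theorem get_indents_eq (l : List Char) :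
    get_indents l 0 = List.replicate (nAval l) ' ' := by
  unfold nAval leadCount
  have hsl : PySem.List.slice l (some 2) none = l.drop 2 := by
    simpa using PySem.List.slice_from l (by norm_num)
  rw [get_indents]
  simp only [PySem.List.pyRange, hsl]
  match l with
  | [] => simp [giLoop, PySem.Chars.startswith]
  | c :: rest =>
    by_cases hc : c = ' '
    · subst hc
      have hsw : PySem.Chars.startswith (' ' :: rest) [' '] = true := by
        rw [PySem.Chars.startswith_iff]; exact ⟨rest, rfl⟩
      rw [giLoop]
      simp only [List.head?_cons, ne_eq, not_true_eq_false, if_false, List.length_nil,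
        List.nil_append]
      match rest with
      | [] => simp [giLoop, hsw]
      | c2 :: rest2 =>
        rw [giLoop]
        simp only [ne_eq, not_true_eq_false, if_false, List.length_cons, List.length_nil]
        norm_num
        rw [giLoop_ge2 _ _ (by simp)]
        have hle : (rest2.takeWhile (fun c => c == ' ')).length ≤ rest2.length :=
          (List.takeWhile_sublist _).length_le
        simp only [hsw, if_true]
        have hmin : min (rest2.length + 1 + 1) (2 + (rest2.takeWhile (fun c => c == ' ')).length)
            = 2 + (rest2.takeWhile (fun c => c == ' ')).length := by omega
        rw [hmin]
        simp [List.replicate_succ, List.replicate_add]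
    · have hsw : PySem.Chars.startswith (c :: rest) [' '] = false := by
        rw [← Bool.not_eq_true, PySem.Chars.startswith_iff]
        intro hp
        rcases hp with ⟨t, ht⟩
        simp at ht; exact hc ht.1.symm
      rw [giLoop]
      simp [hc, hsw]

-- len(l) - len(l.lstrip(" ")) counts the leading spaces
theorem lead_sub (l : List Char) :
    l.length - (l.dropWhile (fun c => c == ' ')).length = leadCount l := by
  have h := congrArg List.length (List.takeWhile_append_dropWhile (p := fun c => c == ' ') (l := l))
  simp only [List.length_append] at h
  unfold leadCount
  omega

-- unless l is one space followed by a non-space, A's count equals the true leading-space count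
theorem nAval_eq_lead (l : List Char) (h : ∀ c rest, l = ' ' :: c :: rest → c = ' ') :
    nAval l = leadCount l := by
  match l with
  | [] => decide
  | c0 :: rest =>
    by_cases h0 : c0 = ' '
    · subst h0
      match rest with
      | [] => decide
      | c1 :: rest2 =>
        have hc1 : c1 = ' ' := h c1 rest2 rfl
        subst hc1
        unfold nAval leadCount
        have hsw : PySem.Chars.startswith (' ' :: ' ' :: rest2) [' '] = true := by
          rw [PySem.Chars.startswith_iff]; exact ⟨' ' :: rest2, rfl⟩
        have hsl : PySem.List.slice (' ' :: ' ' :: rest2) (some 2) none = rest2 := by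
          simpa using PySem.List.slice_from (' ' :: ' ' :: rest2) (by norm_num)
        rw [hsl]
        simp only [hsw, if_true]
        have hle : (rest2.takeWhile (fun c => c == ' ')).length ≤ rest2.length :=
          (List.takeWhile_sublist _).length_le
        simp [List.takeWhile]
        omega
    · unfold nAval leadCount
      have hsw : PySem.Chars.startswith (c0 :: rest) [' '] = false := by
        rw [← Bool.not_eq_true, PySem.Chars.startswith_iff]
        intro hp
        rcases hp with ⟨t, ht⟩
        simp at ht; exact h0 ht.1.symm
      have h0' : (c0 == ' ') = false := by simp [h0]
      simp [hsw, List.takeWhile, h0']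

theorem nAval_ge2 (c : Char) (rest : List Char) :
    2 ≤ nAval (' ' :: c :: rest) := by
  unfold nAval
  have hsw : PySem.Chars.startswith (' ' :: c :: rest) [' '] = true := by
    rw [PySem.Chars.startswith_iff]; exact ⟨c :: rest, rfl⟩
  simp only [hsw, if_true, List.length_cons]
  omega

theorem leadCount_one (c : Char) (rest : List Char) (hc : c ≠ ' ') :
    leadCount (' ' :: c :: rest) = 1 := by
  unfold leadCount
  have hc' : (c == ' ') = false := by simp [hc]
  simp [List.takeWhile, hc']

-- shape of the tab-expanded line, read off dCheck
theorem shape_of_not_D (line : String) (hnD : dCheck line.toList = false) :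
    ∀ c rest, PySem.Chars.replace line.toList ['\t'] [' ', ' ', ' ', ' '] = ' ' :: c :: rest →
      c = ' ' := by
  rw [replace_tab]
  intro c rest hl
  match hline : line.toList with
  | [] => rw [hline] at hl; simp at hl
  | x :: xs =>
    rw [hline] at hl
    rw [hline] at hnD
    rw [List.flatMap_cons] at hl
    by_cases hx : x = '\t'
    · rw [if_pos hx] at hl
      simp at hl
      exact hl.1.symm
    · rw [if_neg hx] at hl
      simp only [List.singleton_append, List.cons.injEq] at hl
      obtain ⟨hx', hl⟩ := hl
      match xs with
      | [] => simp at hl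
      | y :: ys =>
        rw [List.flatMap_cons] at hl
        by_cases hy : y = '\t'
        · rw [if_pos hy] at hl
          simp at hl
          exact hl.1.symm
        · rw [if_neg hy] at hl
          simp only [List.singleton_append, List.cons.injEq] at hl
          by_contra hcne
          subst hx'
          simp [dCheck] at hnD
          by_cases hys : y = ' '
          · exact hcne (by rw [← hl.1]; exact hys)
          · exact hy (hnD hys)

theorem shape_of_D (line : String) (hD : dCheck line.toList = true) :
    ∃ c rest, PySem.Chars.replace line.toList ['\t'] [' ', ' ', ' ', ' '] = ' ' :: c :: rest ∧
      c ≠ ' ' := by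
  match hline : line.toList with
  | [] => rw [hline] at hD; simp [dCheck] at hD
  | [x] => rw [hline] at hD; simp [dCheck] at hD
  | x :: y :: ys =>
    rw [hline] at hD
    simp [dCheck] at hD
    obtain ⟨hx, hy1, hy2⟩ := hD
    subst hx
    refine ⟨y, ys.flatMap (fun c => if c = '\t' then [' ', ' ', ' ', ' '] else [c]), ?_, hy1⟩
    rw [replace_tab, List.flatMap_cons, List.flatMap_cons, if_neg (by decide), if_neg hy2]
    rfl

theorem four_le_round (n : Nat) (h : 2 ≤ n) : 4 ≤ (n + 2) / 4 * 4 := by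
  have : 1 ≤ (n + 2) / 4 := (Nat.le_div_iff_mul_le (by norm_num)).mpr (by omega)
  omega

-- ===== VERDICT =====
theorem indent_correction_spec : Claim_unchanged_indent_correction := by
  intro line _ hnD
  unfold D_indent_correction at hnD
  rw [Bool.not_eq_true] at hnD
  unfold indent_correction indent_correction_alt
  simp only []
  rw [get_indents_eq, List.length_replicate, icWhile_replicate, lead_sub,
    nAval_eq_lead _ (shape_of_not_D line hnD)]

theorem indent_correction_changed : Claim_changed_indent_correction := by
  unfold Claim_changed_indent_correction; decide

theorem indent_correction_tight : Claim_exact_indent_correction := by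
  intro line _ hD heq
  unfold D_indent_correction at hD
  obtain ⟨c, rest, hl, hc⟩ := shape_of_D line hD
  unfold indent_correction indent_correction_alt at heq
  simp only [] at heq
  rw [get_indents_eq, List.length_replicate, icWhile_replicate, lead_sub, hl,
    leadCount_one c rest hc] at heq
  have hlen := congrArg (fun s => s.toList.length) heq
  simp only [String.toList_ofList, List.length_append, List.length_replicate] at hlen
  have h4 : 4 ≤ (nAval (' ' :: c :: rest) + 2) / 4 * 4 :=
    four_le_round _ (nAval_ge2 c rest)
  omega
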